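-- pv_equiv track=rewrite | github.com/awesomematt/WorkshopWebApp | model/apps/orders/models.py | check_if_all_required_fields_are_filled
-- ===== SOURCE A (Python) =====
-- def check_if_all_required_fields_are_filled(list_of_fields):
--     counter = 0
--     field = ''
--     list_of_ids = []
--     list_of_missing_items = []
--     for item in list_of_fields:
--         field = item
--         if not field:
--             list_of_ids.append(counter)
--         counter += 1
--     for id in list_of_ids:
--         if id == 0:
--             field = 'name'
--             list_of_missing_items.append(field)
--         if id == 1:
--             field = 'surname'
--             list_of_missing_items.append(field)
--         if id == 2:
--             field = 'number'
--             list_of_missing_items.append(field)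
--         if id == 3:
--             field = 'e-mail'
--             list_of_missing_items.append(field)
--         if id == 4:
--             field = 'date'
--             list_of_missing_items.append(field)
--     return list_of_missing_items
-- ===== SOURCE B (Python) =====
-- def check_if_all_required_fields_are_filled(list_of_fields):
--     def go(names, fields):
--         if not names or not fields:
--             return []
--         rest = go(names[1:], fields[1:])
--         return [names[0]] + rest if not fields[0] else rest
--     return go(['name', 'surname', 'number', 'e-mail', 'date'], list_of_fields)
-- ===== Notes on version B (the rewrite author's own statement) =====
-- stated objective: simpler
-- what changed: Replaces A's iterative two-pass scheme (counter-driven collection of empty-field indices, then an if-ladder mapping each index to a name) with a recursive co-traversal of the fixed name table and the field list that never materialises indices at all.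
import Mathlib
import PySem

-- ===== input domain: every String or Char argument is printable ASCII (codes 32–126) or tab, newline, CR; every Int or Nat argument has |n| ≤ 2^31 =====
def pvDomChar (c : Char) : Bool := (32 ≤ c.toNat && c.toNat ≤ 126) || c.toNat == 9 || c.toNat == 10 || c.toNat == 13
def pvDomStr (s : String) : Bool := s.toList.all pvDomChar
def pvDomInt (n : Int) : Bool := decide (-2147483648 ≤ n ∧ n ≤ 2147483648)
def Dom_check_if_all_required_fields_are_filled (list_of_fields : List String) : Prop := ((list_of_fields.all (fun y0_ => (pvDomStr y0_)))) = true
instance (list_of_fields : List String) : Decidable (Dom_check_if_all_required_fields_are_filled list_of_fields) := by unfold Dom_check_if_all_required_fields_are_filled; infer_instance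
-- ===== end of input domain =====

-- B replaces A's two passes (counter-driven collection of empty-field indices, then an
-- if-ladder mapping each index to a name) with a recursive co-traversal of the fixed
-- name table and the field list, with no indices at all (objective: simpler).

-- ===== PORT A =====
-- first loop: counter/ids accumulation ('if not field' on a string is 'field == ""')
def pvALoop1 (list_of_fields : List String) : Int × List Int :=
  list_of_fields.foldl
    (fun st item => if item = "" then (st.1 + 1, st.2 ++ [st.1]) else (st.1 + 1, st.2))
    (0, [])

-- second loop body: the five independent 'if id == k' appends, in order
def pvALoop2Step (acc : List String) (id : Int) : List String :=
  let acc := if id = 0 then acc ++ ["name"] else acc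
  let acc := if id = 1 then acc ++ ["surname"] else acc
  let acc := if id = 2 then acc ++ ["number"] else acc
  let acc := if id = 3 then acc ++ ["e-mail"] else acc
  let acc := if id = 4 then acc ++ ["date"] else acc
  acc

def check_if_all_required_fields_are_filled (list_of_fields : List String) : List String :=
  (pvALoop1 list_of_fields).2.foldl pvALoop2Step []

-- ===== PORT B =====
-- Source B's inner 'go': structural recursion on the two lists; 'not fields[0]' is 'fields[0] == ""'
def pvGo : List String → List String → List String
  | [], _ => []
  | _ :: _, [] => []
  | n :: ns, f :: fs => if f = "" then n :: pvGo ns fs else pvGo ns fs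

def check_if_all_required_fields_are_filled_alt (list_of_fields : List String) : List String :=
  pvGo ["name", "surname", "number", "e-mail", "date"] list_of_fields

-- ===== PRECONDITION & SPEC =====
def Spec_check_if_all_required_fields_are_filled (list_of_fields : List String) (out : List String) : Prop := out = check_if_all_required_fields_are_filled_alt list_of_fields
instance (list_of_fields : List String) (out : List String) : Decidable (Spec_check_if_all_required_fields_are_filled list_of_fields out) := by unfold Spec_check_if_all_required_fields_are_filled; infer_instance

-- ===== CLAIM (what is proved, stated in full; the proofs are below) =====
def Claim_equal_check_if_all_required_fields_are_filled : Prop := ∀ (list_of_fields : List String), Dom_check_if_all_required_fields_are_filled list_of_fields → Spec_check_if_all_required_fields_are_filled list_of_fields (check_if_all_required_fields_are_filled list_of_fields)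

-- ===== LEMMAS AND PROOFS =====

def pvNames : List String := ["name", "surname", "number", "e-mail", "date"]

-- the value the if-ladder appends for one id
def pvName (id : Int) : List String :=
  (if id = 0 then ["name"] else []) ++ (if id = 1 then ["surname"] else []) ++
  (if id = 2 then ["number"] else []) ++ (if id = 3 then ["e-mail"] else []) ++
  (if id = 4 then ["date"] else [])

lemma pvALoop2Step_eq (acc : List String) (id : Int) :
    pvALoop2Step acc id = acc ++ pvName id := by
  simp only [pvALoop2Step, pvName]
  split_ifs <;> simp_all

lemma pvFoldl2_eq (l : List Int) (acc : List String) :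
    l.foldl pvALoop2Step acc = acc ++ l.flatMap pvName := by
  induction l generalizing acc with
  | nil => simp
  | cons x xs ih => simp [pvALoop2Step_eq, ih]

lemma pvALoop1_eq (list_of_fields : List String) (c : Int) (ids : List Int) :
    list_of_fields.foldl
      (fun st item => if item = "" then (st.1 + 1, st.2 ++ [st.1]) else (st.1 + 1, st.2))
      (c, ids)
    = (c + list_of_fields.length,
       ids ++ ((PySem.List.enumerate list_of_fields c).filter (fun p => p.2 == "")).map (·.1)) := by
  induction list_of_fields generalizing c ids with
  | nil => simp [PySem.List.enumerate_nil]
  | cons x xs ih =>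
    simp only [List.foldl_cons, PySem.List.enumerate_cons]
    by_cases hx : x = "" <;> simp [hx, ih] <;> omega

lemma pvGo_nil_left (fs : List String) : pvGo [] fs = [] := by cases fs <;> rfl

lemma pvGo_nil_right (ns : List String) : pvGo ns [] = [] := by cases ns <;> rfl

lemma pvName_big (n : Nat) (h : 5 ≤ n) : pvName (n : Int) = [] := by
  unfold pvName
  rw [if_neg (by omega), if_neg (by omega), if_neg (by omega), if_neg (by omega),
    if_neg (by omega)]
  rfl

-- key invariant: the flatMap over the empty-field indices (starting at n) equals
-- the recursive co-traversal with the name table's tail from position n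
lemma pvKey (xs : List String) (n : Nat) :
    (((PySem.List.enumerate xs (n : Int)).filter (fun p => p.2 == "")).map (·.1)).flatMap pvName
    = pvGo (pvNames.drop n) xs := by
  induction xs generalizing n with
  | nil => simp [PySem.List.enumerate_nil, pvGo_nil_right]
  | cons x xs ih =>
    have hrec := ih (n + 1)
    rw [← List.tail_drop] at hrec
    push_cast at hrec
    rw [PySem.List.enumerate_cons]
    rcases hd : pvNames.drop n with _ | ⟨nm, rest⟩
    · have hn : 5 ≤ n := by
        have := List.drop_eq_nil_iff.1 hd
        simpa [pvNames] using this
      rw [hd] at hrec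
      simp only [List.tail_nil] at hrec
      by_cases hx0 : x = ""
      · simp [hx0, hrec, pvGo_nil_left, pvName_big n hn]
      · simp [hx0, hrec, pvGo_nil_left]
    · have hn : n < 5 := by
        by_contra hge
        have : pvNames.drop n = [] := List.drop_eq_nil_of_le (by simp [pvNames]; omega)
        simp [this] at hd
      rw [hd] at hrec
      simp only [List.tail_cons] at hrec
      by_cases hx0 : x = ""
      · have hnm : pvName (n : Int) = [nm] := by
          interval_cases n <;> simp [pvNames] at hd <;> simp [pvName, hd.1]
        simp [hx0, pvGo, hrec, hnm]
      · simp [hx0, pvGo, hrec]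

theorem pv_main (xs : List String) :
    check_if_all_required_fields_are_filled xs = check_if_all_required_fields_are_filled_alt xs := by
  unfold check_if_all_required_fields_are_filled check_if_all_required_fields_are_filled_alt pvALoop1
  rw [pvALoop1_eq, pvFoldl2_eq, List.nil_append, List.nil_append]
  have h := pvKey xs 0
  simp only [Nat.cast_zero, List.drop_zero] at h
  exact h

-- ===== VERDICT (by name: the statement is the Claim_ definition above) =====
theorem check_if_all_required_fields_are_filled_spec : Claim_equal_check_if_all_required_fields_are_filled := by
  intro xs _
  exact pv_main xs
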